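-- pv_equiv track=rewrite | github.com/rj14ng/project-euler | Problem_109/Problem_109.py | ways_first_two_darts
-- ===== SOURCE A (Python) =====
-- def ways_first_two_darts(score):
--     singles = list(range(1, 21, 1))
--     singles.append(25)
--     # Include 0 since if dart_2 == 0
--     # Number of ways to hit score with 1 dart will be counted
--     # Leading to the number of two-dart checkouts
--     # Also, if score == 0
--     # The function returns 1 (number of ways to hit 0 with 0 darts)
--     # Leading to the number of one-dart checkouts
--     singles.append(0)
--     doubles = list(range(2, 41, 2))
--     doubles.append(50)
--     triples = list(range(3, 61, 3))
--     # The number of appearances of a number in this list indicates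
--     # The number of ways to hit that score with one dart
--     counting_list = singles + doubles + triples
--     # Initialising:
--     ways_to_make = 0
--     dart_1 = score
--     dart_2 = 0
--     while dart_1 >= dart_2:
--         # Crossing the possibilities
--         ways = counting_list.count(dart_1) * counting_list.count(dart_2)
--         ways_to_make += ways
--         if dart_1 == dart_2 and counting_list.count(dart_1) == 2:
--             ways_to_make -= 1
--         elif dart_1 == dart_2 and counting_list.count(dart_1) == 3:
--             ways_to_make -= 3
--         dart_1 -= 1
--         dart_2 += 1
--     return ways_to_make
-- ===== SOURCE B (Python) =====
-- def ways_first_two_darts(score):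
--     # Multiset of one-dart region values (0 included once, as in the problem's counting list).
--     region_values = list(range(1, 21)) + [25, 0] + list(range(2, 41, 2)) + [50] + list(range(3, 61, 3))
--     n = len(region_values)
--     total = 0
--     # Enumerate unordered pairs of regions with replacement (indices i <= j).
--     for i in range(n):
--         for j in range(i, n):
--             if region_values[i] + region_values[j] == score:
--                 total += 1
--     return total
-- ===== Notes on version B (the rewrite author's own statement) =====
-- stated objective: faster
-- what changed: B builds the region-value multiset once and directly counts unordered index pairs (i <= j) whose two region values sum to score, replacing A's while-loop over all score complements (with repeated list.count calls and diagonal -1/-3 corrections) by a fixed-size pair enumeration.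
import Mathlib
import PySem

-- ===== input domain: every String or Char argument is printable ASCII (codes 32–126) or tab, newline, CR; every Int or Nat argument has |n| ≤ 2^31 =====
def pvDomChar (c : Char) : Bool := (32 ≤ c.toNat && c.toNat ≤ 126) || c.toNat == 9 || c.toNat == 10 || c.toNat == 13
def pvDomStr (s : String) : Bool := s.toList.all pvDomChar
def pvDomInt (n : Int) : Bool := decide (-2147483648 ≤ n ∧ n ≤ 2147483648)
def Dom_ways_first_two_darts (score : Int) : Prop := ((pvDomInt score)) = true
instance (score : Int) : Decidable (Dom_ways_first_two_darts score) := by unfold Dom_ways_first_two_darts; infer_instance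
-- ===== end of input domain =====

-- B enumerates unordered region pairs (indices i ≤ j) directly and counts pairs summing to
-- score, replacing A's while-loop over score complements with its diagonal corrections;
-- constant work instead of a loop of ~score/2 iterations.

-- ===== PORT A =====
-- counting_list = singles (1..20, 25, 0) + doubles (2..40 step 2, 50) + triples (3..60 step 3)
def pvCountingList : List Int :=
  let singles := PySem.List.pyRange 1 21 1 ++ [25] ++ [0]
  let doubles := PySem.List.pyRange 2 41 2 ++ [50]
  let triples := PySem.List.pyRange 3 61 3
  singles ++ doubles ++ triples

-- the while-loop of A: state (dart_1, dart_2, ways_to_make); fuel only makes the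
-- recursion structural, (score+1).toNat always suffices (the loop runs ≤ score/2+1 times)
def pvWaysLoop : Nat → Int → Int → Int → Int
  | 0, _, _, acc => acc
  | fuel + 1, d1, d2, acc =>
    if d2 ≤ d1 then
      let ways := PySem.List.count pvCountingList d1 * PySem.List.count pvCountingList d2
      let acc1 := acc + (ways : Int)
      let acc2 :=
        if d1 = d2 ∧ PySem.List.count pvCountingList d1 = 2 then acc1 - 1
        else if d1 = d2 ∧ PySem.List.count pvCountingList d1 = 3 then acc1 - 3
        else acc1
      pvWaysLoop fuel (d1 - 1) (d2 + 1) acc2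
    else acc

def ways_first_two_darts (score : Int) : Int := pvWaysLoop (score + 1).toNat score 0 0

-- ===== PORT B =====
def pvRegionValues : List Int :=
  PySem.List.pyRange 1 21 1 ++ [25, 0] ++ PySem.List.pyRange 2 41 2 ++ [50]
    ++ PySem.List.pyRange 3 61 3

def ways_first_two_darts_alt (score : Int) : Int :=
  let n : Int := PySem.List.len pvRegionValues
  -- indices are always in range, so xs[i] is ported with pyGetD (default never used)
  (PySem.List.pyRange 0 n 1).foldl (fun tot i =>
    (PySem.List.pyRange i n 1).foldl (fun tot j =>
      if PySem.List.pyGetD pvRegionValues i 0 + PySem.List.pyGetD pvRegionValues j 0 = score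
      then tot + 1 else tot) tot) 0

-- ===== PRECONDITION & SPEC =====
def Spec_ways_first_two_darts (score : Int) (out : Int) : Prop := out = ways_first_two_darts_alt score
instance (score : Int) (out : Int) : Decidable (Spec_ways_first_two_darts score out) := by unfold Spec_ways_first_two_darts; infer_instance

-- ===== CLAIM (what is proved, stated in full; the proofs are below) =====
def Claim_equal_ways_first_two_darts : Prop := ∀ (score : Int), Dom_ways_first_two_darts score → Spec_ways_first_two_darts score (ways_first_two_darts score)

-- ===== LEMMAS AND PROOFS =====

-- every value in the counting list is at most 60
theorem pvCount_gt_60 (x : Int) (hx : 60 < x) : PySem.List.count pvCountingList x = 0 := by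
  rw [PySem.List.count_eq]
  have h : ∀ a ∈ pvCountingList, a ≤ 60 := by decide
  have : x ∉ pvCountingList := fun hm => absurd (h x hm) (by omega)
  simp [List.count_eq_zero.mpr this]

-- A's loop adds nothing once the invariant sum dart_1 + dart_2 exceeds 120
theorem pvWaysLoop_big (fuel : Nat) (d1 d2 acc : Int) (h : 120 < d1 + d2) :
    pvWaysLoop fuel d1 d2 acc = acc := by
  induction fuel generalizing d1 d2 acc with
  | zero => rfl
  | succ fuel ih =>
    rw [pvWaysLoop]
    split
    · next hle =>
      have h1 : 60 < d1 := by omega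
      have hc : PySem.List.count pvCountingList d1 = 0 := pvCount_gt_60 d1 h1
      simp only [hc, Nat.zero_mul, Int.natCast_zero, Int.add_zero]
      have hne : ¬ (d1 = d2 ∧ (0 : Nat) = 2) := by omega
      have hne3 : ¬ (d1 = d2 ∧ (0 : Nat) = 3) := by omega
      rw [if_neg hne, if_neg hne3]
      exact ih _ _ _ (by omega)
    · rfl

-- a counting fold over a list with no hits is the identity
theorem pvFoldl_nohit (l : List Int) (g : Int → Int) (s acc : Int)
    (h : ∀ j ∈ l, g j ≠ s) :
    l.foldl (fun t j => if g j = s then t + 1 else t) acc = acc := by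
  induction l generalizing acc with
  | nil => rfl
  | cons a tl ih =>
    simp only [List.foldl_cons, if_neg (h a (by simp))]
    exact ih acc (fun j hj => h j (List.mem_cons_of_mem _ hj))

theorem pvFoldl_id {α : Type} (l : List α) (f : Int → α → Int) (acc : Int)
    (h : ∀ a ∈ l, ∀ t, f t a = t) : l.foldl f acc = acc := by
  induction l generalizing acc with
  | nil => rfl
  | cons a tl ih =>
    simp only [List.foldl_cons, h a (by simp)]
    exact ih acc (fun b hb t => h b (List.mem_cons_of_mem _ hb) t)

-- all region values lie in [0, 60]
theorem pvRegion_bounds : ∀ a ∈ pvRegionValues, 0 ≤ a ∧ a ≤ 60 := by decide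

-- B returns 0 when score is negative or exceeds 120
theorem pvAlt_out_of_range (score : Int) (h : score < 0 ∨ 120 < score) :
    ways_first_two_darts_alt score = 0 := by
  unfold ways_first_two_darts_alt
  apply pvFoldl_id
  intro i hi t
  apply pvFoldl_nohit
  intro j hj
  have hi' := (PySem.List.mem_pyRange_one).mp hi
  have hj' := (PySem.List.mem_pyRange_one).mp hj
  simp only [PySem.List.len_eq] at hi' hj'
  have hlen : pvRegionValues.length = 63 := by decide
  have hmi : PySem.List.pyGetD pvRegionValues i 0 ∈ pvRegionValues :=
    PySem.List.pyGetD_mem _ _ (by simp [PySem.Raise.InRange, hlen]; omega)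
  have hmj : PySem.List.pyGetD pvRegionValues j 0 ∈ pvRegionValues :=
    PySem.List.pyGetD_mem _ _ (by simp [PySem.Raise.InRange, hlen]; omega)
  have bi := pvRegion_bounds _ hmi
  have bj := pvRegion_bounds _ hmj
  omega

-- A returns 0 when score is negative (loop never runs)
theorem pvA_neg (score : Int) (h : score < 0) : ways_first_two_darts score = 0 := by
  unfold ways_first_two_darts
  have : (score + 1).toNat = 0 := by omega
  rw [this, pvWaysLoop]

-- fast closed form of one-dart counts, used only to speed up the finite check
def pvCnt (x : Int) : Nat :=
  (if 1 ≤ x ∧ x < 21 then 1 else 0) + (if x = 25 then 1 else 0) + (if x = 0 then 1 else 0)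
  + (if 2 ≤ x ∧ x < 41 ∧ (2 : Int) ∣ x - 2 then 1 else 0) + (if x = 50 then 1 else 0)
  + (if 3 ≤ x ∧ x < 61 ∧ (3 : Int) ∣ x - 3 then 1 else 0)

theorem pvCount_eq (x : Int) : PySem.List.count pvCountingList x = pvCnt x := by
  rw [PySem.List.count_eq]
  have c1 : List.count x (PySem.List.pyRange 1 21 1) = if 1 ≤ x ∧ x < 21 then 1 else 0 := by
    by_cases h : 1 ≤ x ∧ x < 21
    · rw [if_pos h]
      exact List.count_eq_one_of_mem (PySem.List.nodup_pyRange_one 1 21)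
        (PySem.List.mem_pyRange_one.mpr h)
    · rw [if_neg h]
      exact List.count_eq_zero_of_not_mem (fun hm => h (PySem.List.mem_pyRange_one.mp hm))
  have c2 : List.count x (PySem.List.pyRange 2 41 2)
      = if 2 ≤ x ∧ x < 41 ∧ (2 : Int) ∣ x - 2 then 1 else 0 := by
    by_cases h : 2 ≤ x ∧ x < 41 ∧ (2 : Int) ∣ x - 2
    · rw [if_pos h]
      exact List.count_eq_one_of_mem (by decide)
        ((PySem.List.mem_pyRange_iff_of_pos (by norm_num) x).mpr h)
    · rw [if_neg h]
      exact List.count_eq_zero_of_not_mem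
        (fun hm => h ((PySem.List.mem_pyRange_iff_of_pos (by norm_num) x).mp hm))
  have c3 : List.count x (PySem.List.pyRange 3 61 3)
      = if 3 ≤ x ∧ x < 61 ∧ (3 : Int) ∣ x - 3 then 1 else 0 := by
    by_cases h : 3 ≤ x ∧ x < 61 ∧ (3 : Int) ∣ x - 3
    · rw [if_pos h]
      exact List.count_eq_one_of_mem (by decide)
        ((PySem.List.mem_pyRange_iff_of_pos (by norm_num) x).mpr h)
    · rw [if_neg h]
      exact List.count_eq_zero_of_not_mem
        (fun hm => h ((PySem.List.mem_pyRange_iff_of_pos (by norm_num) x).mp hm))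
  have c25 : List.count x [(25 : Int)] = if x = 25 then 1 else 0 := by
    by_cases h : x = 25
    · simp [h]
    · rw [if_neg h]
      exact List.count_eq_zero_of_not_mem (by simp [h])
  have c0 : List.count x [(0 : Int)] = if x = 0 then 1 else 0 := by
    by_cases h : x = 0
    · simp [h]
    · rw [if_neg h]
      exact List.count_eq_zero_of_not_mem (by simp [h])
  have c50 : List.count x [(50 : Int)] = if x = 50 then 1 else 0 := by
    by_cases h : x = 50
    · simp [h]
    · rw [if_neg h]
      exact List.count_eq_zero_of_not_mem (by simp [h])
  simp only [pvCountingList, List.count_append, c1, c2, c3, c25, c0, c50, pvCnt]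
  omega

-- A's loop with the closed-form count substituted (proof-only helper for the finite check)
def pvLoopFast : Nat → Int → Int → Int → Int
  | 0, _, _, acc => acc
  | fuel + 1, d1, d2, acc =>
    if d2 ≤ d1 then
      let acc1 := acc + ((pvCnt d1 * pvCnt d2 : Nat) : Int)
      let acc2 :=
        if d1 = d2 ∧ pvCnt d1 = 2 then acc1 - 1
        else if d1 = d2 ∧ pvCnt d1 = 3 then acc1 - 3
        else acc1
      pvLoopFast fuel (d1 - 1) (d2 + 1) acc2
    else acc

theorem pvLoop_eq (fuel : Nat) : ∀ d1 d2 acc : Int,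
    pvWaysLoop fuel d1 d2 acc = pvLoopFast fuel d1 d2 acc := by
  induction fuel with
  | zero => intro _ _ _; rfl
  | succ f ih =>
    intro d1 d2 acc
    rw [pvWaysLoop, pvLoopFast]
    simp only [pvCount_eq]
    split
    · exact ih _ _ _
    · rfl

-- B's nested index fold, rewritten as a structural recursion over the suffixes of the
-- region list (proof-only helper: for each suffix x :: tl, count y ∈ x :: tl with x + y = s)
def pvGo (s : Int) : List Int → Int → Int
  | [], acc => acc
  | x :: tl, acc => pvGo s tl ((x :: tl).foldl (fun t y => if x + y = s then t + 1 else t) acc)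

theorem pvOuter (s : Int) (xs : List Int) (k : Nat) : ∀ (m : Nat) (acc : Int),
    xs.length - m = k →
    (PySem.List.pyRange (m : Int) (xs.length : Int) 1).foldl
      (fun tot i => (PySem.List.pyRange i (xs.length : Int) 1).foldl
        (fun t j =>
          if PySem.List.pyGetD xs i 0 + PySem.List.pyGetD xs j 0 = s then t + 1 else t) tot) acc
    = pvGo s (xs.drop m) acc := by
  induction k with
  | zero =>
    intro m acc hk
    have hm : xs.length ≤ m := by omega
    rw [PySem.List.pyRange_one_eq_nil (by exact_mod_cast hm), List.drop_of_length_le hm]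
    rfl
  | succ k ih =>
    intro m acc hk
    have hm : m < xs.length := by omega
    have hget : PySem.List.pyGetD xs (m : Int) 0 = xs[m] := by
      rw [PySem.List.pyGetD_eq_getElem xs 0 (by positivity) (by exact_mod_cast hm)]
      simp
    have hdrop : xs.drop m = xs[m] :: xs.drop (m + 1) := List.drop_eq_getElem_cons hm
    rw [PySem.List.pyRange_one_cons (by exact_mod_cast hm), List.foldl_cons,
      PySem.List.foldl_pyRange_pyGetD' xs 0
        (fun t y => if PySem.List.pyGetD xs (m : Int) 0 + y = s then t + 1 else t) acc
        (a := (m : Int)) (by positivity),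
      show ((m : Int) + 1) = ((m + 1 : Nat) : Int) by push_cast; ring,
      ih (m + 1) _ (by omega), Int.toNat_natCast]
    conv_rhs => rw [hdrop, pvGo]
    congr 1
    simp only [hget]
    rw [hdrop]

-- B's port equals the suffix recursion
theorem pvAlt_eq_go (s : Int) : ways_first_two_darts_alt s = pvGo s pvRegionValues 0 := by
  have h := pvOuter s pvRegionValues pvRegionValues.length 0 0 (by omega)
  simpa [ways_first_two_darts_alt, PySem.List.len_eq] using h

-- the two ports agree on every score from 0 to 120 (finite check, via the suffix recursion)
set_option maxRecDepth 100000 in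
set_option maxHeartbeats 1000000 in
theorem pvSmallFast : ∀ n : Nat, n < 121 →
    pvLoopFast ((n : Int) + 1).toNat (n : Int) 0 0 = pvGo (n : Int) pvRegionValues 0 := by decide

theorem pvSmall (n : Nat) (h : n < 121) :
    ways_first_two_darts (n : Int) = pvGo (n : Int) pvRegionValues 0 := by
  rw [show ways_first_two_darts (n : Int)
      = pvWaysLoop ((n : Int) + 1).toNat (n : Int) 0 0 from rfl, pvLoop_eq]
  exact pvSmallFast n h

-- ===== VERDICT =====
theorem ways_first_two_darts_spec : Claim_equal_ways_first_two_darts := by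
  intro score _
  unfold Spec_ways_first_two_darts
  rcases lt_trichotomy score 0 with hneg | h0 | hpos
  · rw [pvA_neg score hneg, pvAlt_out_of_range score (Or.inl hneg)]
  · subst h0
    rw [pvAlt_eq_go]
    exact pvSmall 0 (by omega)
  · by_cases hbig : 120 < score
    · rw [show ways_first_two_darts score = pvWaysLoop (score + 1).toNat score 0 0 from rfl,
        pvWaysLoop_big _ score 0 0 (by omega), pvAlt_out_of_range score (Or.inr hbig)]
    · have hs : score = (score.toNat : Int) := (Int.toNat_of_nonneg (by omega)).symm
      rw [hs, pvAlt_eq_go]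
      exact pvSmall score.toNat (by omega)
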